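-- pv_equiv track=rewrite | github.com/SebasED/mentalidad_de_colmena | punto_2.py | encode_and_decode
-- ===== SOURCE A (Python) =====
-- def separate_numbers(message):
--     """Separate numbers of a string in a different list
--
--     Args:
--         message (str): String with the numbers to separate
--
--     Returns:
--         (List): List with numbers
--     """
--     list_message = list(message)
--     numbers = []
--     for item in list_message:
--         """Compare ASCII values."""
--         if (ord(item) >= 48) and (ord(item) <= 57):
--             numbers.append(item)
--     return numbers
--
-- def join_numbers(message, numbers):
--     """Replace the numbers in a list with other numbers list
--
--     Args:
--         message (List): List where the numbers will be replaced
--         numbers (List): List with numbers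
--
--     Returns:
--         (str): String with new number incorporated
--     """
--     list_message = list(message)
--     count = 0
--     for index, char in enumerate(list_message):
--         """Compare ASCII values."""
--         if (ord(char) >= 48) and (ord(char) <= 57):
--             list_message[index] = numbers[count]
--             count += 1
--         if count == len(numbers): break
--
--     """convert list to str"""
--     str_message = "".join(list_message)
--     return str_message
--
-- def encode_and_decode(message):
--     """Encode or decode a message
--
--     Args:
--         message (str): String to encode or decode
--
--     Returns:
--         (str): Encode or decode message
--     """
--     numbers = separate_numbers(message)
--
--     for index, num in enumerate(numbers):
--         if num == "1": numbers[index] = "9"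
--         elif num == "2": numbers[index] = "8"
--         elif num == "3": numbers[index] = "7"
--         elif num == "4": numbers[index] = "6"
--         elif num == "5": numbers[index] = "0"
--         elif num == "6": numbers[index] = "4"
--         elif num == "7": numbers[index] = "3"
--         elif num == "8": numbers[index] = "2"
--         elif num == "9": numbers[index] = "1"
--         elif num == "0": numbers[index] = "5"
--
--     encode_message = join_numbers(message, numbers)
--     return encode_message
-- ===== SOURCE B (Python) =====
-- _TABLE = str.maketrans("1234567890", "9876043215")
--
-- def encode_and_decode(message):
--     return message.translate(_TABLE)
-- ===== Notes on version B (the rewrite author's own statement) =====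
-- stated objective: idiomatic
-- what changed: Replaced the extract-digits / mutate-list / re-join three-pass structure with a single table-driven str.translate pass over the message.
import Mathlib
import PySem

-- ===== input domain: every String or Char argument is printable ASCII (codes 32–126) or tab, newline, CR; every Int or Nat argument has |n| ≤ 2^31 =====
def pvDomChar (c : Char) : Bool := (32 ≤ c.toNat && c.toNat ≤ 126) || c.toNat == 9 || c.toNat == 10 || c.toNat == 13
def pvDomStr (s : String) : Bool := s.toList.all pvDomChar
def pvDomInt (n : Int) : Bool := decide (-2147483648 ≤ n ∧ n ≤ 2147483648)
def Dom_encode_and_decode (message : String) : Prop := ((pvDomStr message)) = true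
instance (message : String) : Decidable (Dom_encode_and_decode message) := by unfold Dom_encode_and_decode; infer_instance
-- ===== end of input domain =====

-- B replaces A's extract-digits / mutate-list / re-join three-pass structure with one
-- table-driven translation pass over the message (same output, same cost).

-- ===== PORT A =====
-- separate_numbers: collect the digit characters of the message
def pvSep : List Char → List Char
  | [] => []
  | c :: rest => if 48 ≤ c.toNat ∧ c.toNat ≤ 57 then c :: pvSep rest else pvSep rest

-- the body of A's elif chain over one element of `numbers`
def pvMapNum (c : Char) : Char :=
  if c = '1' then '9'
  else if c = '2' then '8'
  else if c = '3' then '7'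
  else if c = '4' then '6'
  else if c = '5' then '0'
  else if c = '6' then '4'
  else if c = '7' then '3'
  else if c = '8' then '2'
  else if c = '9' then '1'
  else if c = '0' then '5'
  else c

-- join_numbers: replace digits in order with `nums`, break when `count == len(numbers)`
-- (the remaining nums are carried instead of a count; the [] branch on a digit is
-- Python's numbers[count] IndexError, unreachable from encode_and_decode, where it
-- returns the rest unchanged)
def pvJoin : List Char → List Char → List Char
  | [], _ => []
  | c :: rest, nums =>
    if 48 ≤ c.toNat ∧ c.toNat ≤ 57 then
      match nums with
      | [] => c :: rest
      | n :: ns => n :: (if ns.isEmpty then rest else pvJoin rest ns)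
    else
      if nums.isEmpty then c :: rest else c :: pvJoin rest nums

def encode_and_decode (message : String) : String :=
  String.mk (pvJoin message.toList ((pvSep message.toList).map pvMapNum))

-- ===== PORT B =====
-- the translation table built by str.maketrans("1234567890", "9876043215")
def pvTable : List (Char × Char) := List.zip "1234567890".toList "9876043215".toList

-- message.translate(_TABLE): one pass, look each char up in the table
def encode_and_decode_alt (message : String) : String :=
  String.mk (message.toList.map (fun c => ((pvTable.lookup c).getD c)))

-- ===== PRECONDITION & SPEC =====
def Spec_encode_and_decode (message : String) (out : String) : Prop := out = encode_and_decode_alt message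
instance (message : String) (out : String) : Decidable (Spec_encode_and_decode message out) := by unfold Spec_encode_and_decode; infer_instance

-- ===== CLAIM (what is proved, stated in full; the proofs are below) =====
def Claim_equal_encode_and_decode : Prop := ∀ (message : String), Dom_encode_and_decode message → Spec_encode_and_decode message (encode_and_decode message)

-- ===== LEMMAS AND PROOFS =====

-- table lookup agrees with A's elif chain on every character
lemma swap_eq_mapNum (c : Char) : (pvTable.lookup c).getD c = pvMapNum c := by
  unfold pvMapNum
  split_ifs with h1 h2 h3 h4 h5 h6 h7 h8 h9 h0
  all_goals first
    | (subst_vars; decide)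
    | (have b : ∀ d : Char, c ≠ d → (c == d) = false := fun d hd => beq_eq_false_iff_ne.mpr hd
       simp [pvTable, List.lookup, b _ h1, b _ h2, b _ h3, b _ h4, b _ h5, b _ h6, b _ h7,
             b _ h8, b _ h9, b _ h0])

-- a non-digit character is left unchanged by the elif chain
lemma mapNum_nondigit {c : Char} (h : ¬ (48 ≤ c.toNat ∧ c.toNat ≤ 57)) : pvMapNum c = c := by
  unfold pvMapNum
  split_ifs with h1 h2 h3 h4 h5 h6 h7 h8 h9 h0 <;> first
    | rfl
    | (subst_vars; exact absurd (by decide) h)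

-- a digit-free suffix is mapped to itself
lemma map_of_sep_nil : ∀ (l : List Char), pvSep l = [] →
    l.map pvMapNum = l := by
  intro l h
  induction l with
  | nil => rfl
  | cons c rest ih =>
    by_cases hd : 48 ≤ c.toNat ∧ c.toNat ≤ 57
    · simp [pvSep, hd] at h
    · simp only [pvSep, if_neg hd] at h
      simp [mapNum_nondigit hd, ih h]

-- the key invariant: rejoining the mapped digit list is the single mapped pass
lemma join_sep_map : ∀ (l : List Char),
    pvJoin l ((pvSep l).map pvMapNum) = l.map pvMapNum := by
  intro l
  induction l with
  | nil => rfl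
  | cons c rest ih =>
    by_cases hd : 48 ≤ c.toNat ∧ c.toNat ≤ 57
    · simp only [pvSep, if_pos hd, List.map_cons, pvJoin]
      by_cases hnil : pvSep rest = []
      · simp [hnil, map_of_sep_nil rest hnil]
      · have hne : ((pvSep rest).map pvMapNum).isEmpty = false := by
          simp [List.isEmpty_eq_false_iff, hnil]
        simp [hne, ih]
    · simp only [pvSep, if_neg hd, pvJoin]
      by_cases hnil : pvSep rest = []
      · simp [hnil, mapNum_nondigit hd, map_of_sep_nil rest hnil]
      · have hne : ((pvSep rest).map pvMapNum).isEmpty = false := by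
          simp [List.isEmpty_eq_false_iff, hnil]
        simp [hne, ih, mapNum_nondigit hd]

-- ===== VERDICT (by name: the statement is the Claim_ definition above) =====
theorem encode_and_decode_spec : Claim_equal_encode_and_decode := by
  intro message _
  unfold Spec_encode_and_decode encode_and_decode encode_and_decode_alt
  rw [join_sep_map]
  simp [swap_eq_mapNum]
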